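-- pv_equiv track=rewrite | github.com/3iqpotato/Softuni_Exercises | Fundamentals/6th/manipulation_something.py | what_kind
-- ===== SOURCE A (Python) =====
-- def what_kind(a, b, c):
--     if a == 0 or b == 0 or c == 0:
--         return 'zero'
--     else:
--         if a > 0 and b > 0 and c > 0:
--             return 'positive'
--         else:
--             count_negative = 0
--             nums = [a, b, c]
--             for x in range(3):
--                 if nums[x] < 0:
--                     count_negative += 1
--             if count_negative == 2:
--                 return 'positive'
--             else:
--                 return 'negative'
-- ===== SOURCE B (Python) =====
-- def what_kind(a, b, c):
--     p = a * b * c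
--     if p == 0:
--         return 'zero'
--     elif p > 0:
--         return 'positive'
--     else:
--         return 'negative'
-- ===== Notes on version B (the rewrite author's own statement) =====
-- stated objective: simpler
-- what changed: Replaces the zero test, all-positive test and explicit negative-counting loop over [a,b,c] with a single sign-of-product test on a*b*c.
import Mathlib
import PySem

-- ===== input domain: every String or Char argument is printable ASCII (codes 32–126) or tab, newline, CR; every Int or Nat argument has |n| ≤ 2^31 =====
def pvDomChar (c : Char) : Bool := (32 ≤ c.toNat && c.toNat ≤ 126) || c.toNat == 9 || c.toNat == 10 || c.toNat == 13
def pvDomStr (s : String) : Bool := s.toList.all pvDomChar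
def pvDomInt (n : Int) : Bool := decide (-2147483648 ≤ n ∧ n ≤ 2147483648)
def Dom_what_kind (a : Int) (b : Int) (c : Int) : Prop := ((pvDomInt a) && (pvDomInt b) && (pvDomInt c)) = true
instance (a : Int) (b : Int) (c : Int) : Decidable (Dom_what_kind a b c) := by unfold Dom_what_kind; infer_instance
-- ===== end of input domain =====

-- B replaces A's explicit negative-counting loop by a single sign-of-product test (simpler; same cost).


-- ===== PORT A =====
-- Literal port of A: zero test, all-positive test, then the negative-counting loop over nums.
def what_kind (a : Int) (b : Int) (c : Int) : String :=
  if a = 0 ∨ b = 0 ∨ c = 0 then "zero"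
  else if a > 0 ∧ b > 0 ∧ c > 0 then "positive"
  else
    let nums : List Int := [a, b, c]
    let count_negative : Int :=
      (PySem.List.pyRange 0 3 1).foldl
        (fun acc x => if (PySem.List.pyGet? nums x).getD 0 < 0 then acc + 1 else acc) 0
    if count_negative = 2 then "positive" else "negative"

-- ===== PORT B =====
-- B: sign of the product a*b*c decides the answer.
def what_kind_alt (a : Int) (b : Int) (c : Int) : String :=
  let p := a * b * c
  if p = 0 then "zero" else if p > 0 then "positive" else "negative"

-- ===== PRECONDITION & SPEC =====
def Spec_what_kind (a : Int) (b : Int) (c : Int) (out : String) : Prop := out = what_kind_alt a b c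
instance (a : Int) (b : Int) (c : Int) (out : String) : Decidable (Spec_what_kind a b c out) := by unfold Spec_what_kind; infer_instance

-- ===== CLAIM (what is proved, stated in full; the proofs are below) =====
def Claim_equal_what_kind : Prop := ∀ (a : Int) (b : Int) (c : Int), Dom_what_kind a b c → Spec_what_kind a b c (what_kind a b c)

-- ===== LEMMAS AND PROOFS =====

-- ===== VERDICT (by name: the statement is the Claim_ definition above) =====
set_option maxHeartbeats 2000000 in
theorem what_kind_spec : Claim_equal_what_kind := by
  intro a b c _
  unfold Spec_what_kind what_kind what_kind_alt
  have h : PySem.List.pyRange 0 3 1 = [0, 1, 2] := by decide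
  simp only [h, List.foldl, PySem.List.pyGet?, PySem.List.pyIdx?]
  norm_num
  simp only [show ((2 : Int)).toNat = 2 from rfl,
    List.getElem_cons_zero, List.getElem_cons_succ]
  rcases lt_trichotomy a 0 with ha | ha | ha <;>
    rcases lt_trichotomy b 0 with hb | hb | hb <;>
      rcases lt_trichotomy c 0 with hc | hc | hc <;>
  -- establish the sign of the product in each of the 27 sign patterns
  first
    | (have hp : a * b * c = 0 := by subst_vars; ring
       split_ifs <;> first | rfl | (exfalso; omega))
    | (have hp : 0 < a * b * c := by
         first
           | exact mul_pos (mul_pos ‹0 < a› ‹0 < b›) ‹0 < c›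
           | exact mul_pos (mul_pos_of_neg_of_neg ‹a < 0› ‹b < 0›) ‹0 < c›
           | exact mul_pos_of_neg_of_neg (mul_neg_of_neg_of_pos ‹a < 0› ‹0 < b›) ‹c < 0›
           | exact mul_pos_of_neg_of_neg (mul_neg_of_pos_of_neg ‹0 < a› ‹b < 0›) ‹c < 0›
       split_ifs <;> first | rfl | (exfalso; omega))
    | (have hp : a * b * c < 0 := by
         first
           | exact mul_neg_of_pos_of_neg (mul_pos_of_neg_of_neg ‹a < 0› ‹b < 0›) ‹c < 0›
           | exact mul_neg_of_pos_of_neg (mul_pos ‹0 < a› ‹0 < b›) ‹c < 0›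
           | exact mul_neg_of_neg_of_pos (mul_neg_of_pos_of_neg ‹0 < a› ‹b < 0›) ‹0 < c›
           | exact mul_neg_of_neg_of_pos (mul_neg_of_neg_of_pos ‹a < 0› ‹0 < b›) ‹0 < c›
       split_ifs <;> first | rfl | (exfalso; omega))
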